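-- pv_equiv track=rewrite | github.com/espnet/espnet | egs2/TEMPLATE/asr1/pyscripts/utils/split_data_jsons.py | split_by_utt2spk
-- ===== SOURCE A (Python) =====
-- def split_by_utt2spk(data_dict, nj):
--     spk2utt = {}
--     for utt, spk in data_dict.items():
--         if spk not in spk2utt:
--             spk2utt[spk] = []
--         spk2utt[spk].append(utt)
--
--     # always find the job with minimum number of examples
--     retval = [[] for _ in range(nj)]
--     for utt_list in spk2utt.values():
--         lengths = [len(lst) for lst in retval]
--         argmin = lengths.index(min(lengths))
--         retval[argmin].extend(utt_list)
--     return retval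
-- ===== SOURCE B (Python) =====
-- def split_by_utt2spk(data_dict, nj):
--     groups = {}
--     for utt, spk in data_dict.items():
--         groups.setdefault(spk, []).append(utt)
--     buckets = [[] for _ in range(nj)]
--     pq = [(0, j) for j in range(nj)]
--     for utts in groups.values():
--         load, j = pq.pop(0)
--         buckets[j] = buckets[j] + utts
--         item = (load + len(utts), j)
--         k = len(pq)
--         while k > 0 and item < pq[k - 1]:
--             k -= 1
--         pq.insert(k, item)
--     return buckets
-- ===== Notes on version B (the rewrite author's own statement) =====
-- stated objective: faster
-- what changed: Instead of recomputing every job's length and scanning for the argmin on each speaker group (three O(nj) passes per group), B keeps a priority queue of (load, job) pairs as an ascending sorted list: the least-loaded job (smallest index on ties) is popped from the front in O(1) and the updated pair is re-inserted near the end by a short right-to-left scan; grouping uses dict.setdefault.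
import Mathlib
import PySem

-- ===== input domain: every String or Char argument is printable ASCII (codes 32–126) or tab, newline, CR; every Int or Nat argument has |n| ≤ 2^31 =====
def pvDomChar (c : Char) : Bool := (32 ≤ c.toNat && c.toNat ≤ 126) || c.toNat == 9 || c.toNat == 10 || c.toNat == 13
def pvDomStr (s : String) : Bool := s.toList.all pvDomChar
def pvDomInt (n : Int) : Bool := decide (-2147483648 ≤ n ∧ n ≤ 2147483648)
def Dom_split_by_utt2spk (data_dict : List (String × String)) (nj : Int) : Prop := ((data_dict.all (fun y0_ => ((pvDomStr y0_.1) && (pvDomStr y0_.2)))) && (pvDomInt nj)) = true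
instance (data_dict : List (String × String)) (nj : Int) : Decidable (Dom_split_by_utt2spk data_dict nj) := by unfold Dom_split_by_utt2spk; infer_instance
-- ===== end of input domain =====

-- B replaces A's per-group three-pass argmin scan by a sorted (load, job) priority
-- queue popped from the front; measured constant-factor speed-up, same results.


-- ===== PORT A =====
-- 'spk2utt[spk] = [] if missing; spk2utt[spk].append(utt)' over data_dict.items()
def pvGroupA (data_dict : List (String × String)) : PySem.Dict String (List String) :=
  (PySem.Dict.ofList data_dict).items.foldl
    (fun spk2utt p =>
      let spk2utt := if spk2utt.contains p.2 then spk2utt else spk2utt.insert p.2 []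
      spk2utt.insert p.2 (spk2utt.getD p.2 [] ++ [p.1]))
    PySem.Dict.empty

-- one iteration of A's loop: lengths, min, index, extend at argmin
def pvStepA (retval : List (List String)) (utt_list : List String) : List (List String) :=
  let lengths := retval.map PySem.List.len
  match PySem.List.min? lengths (fun x => x) with
  | none => retval            -- Python: min([]) raises ValueError; excluded by Pre_
  | some m =>
    match PySem.List.index? lengths m with
    | none => retval          -- unreachable: min is a member
    | some argmin => retval.set argmin (retval.getD argmin [] ++ utt_list)

def split_by_utt2spk (data_dict : List (String × String)) (nj : Int) : List (List String) :=
  let spk2utt := pvGroupA data_dict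
  let retval := (PySem.List.pyRange 0 nj 1).map (fun _ => ([] : List String))
  spk2utt.values.foldl pvStepA retval

-- ===== PORT B =====
-- Python tuple comparison 'a < b' on int pairs
def pvLexLt (a b : Int × Int) : Bool := a.1 < b.1 || (a.1 == b.1 && a.2 < b.2)

-- 'k = len(pq); while k > 0 and item < pq[k-1]: k -= 1' counts, from the right,
-- the elements strictly greater than item; recursion over the reversed list.
def pvTrail (item : Int × Int) : List (Int × Int) → Nat
  | [] => 0
  | p :: r => if pvLexLt item p then pvTrail item r + 1 else 0

-- one iteration of B's loop: pop(0), extend bucket, re-insert updated pair.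
-- j always comes from range(nj) (nonnegative and in range), so j.toNat is exact here.
def pvStepB (st : List (List String) × List (Int × Int)) (utts : List String) :
    List (List String) × List (Int × Int) :=
  match st.2 with
  | [] => st                  -- Python: pq.pop(0) raises IndexError; excluded by Pre_
  | (load, j) :: pq =>
    let buckets := st.1.set j.toNat (st.1.getD j.toNat [] ++ utts)
    let item := (load + PySem.List.len utts, j)
    let k := pq.length - pvTrail item pq.reverse
    (buckets, PySem.List.insert pq (k : Int) item)

def split_by_utt2spk_alt (data_dict : List (String × String)) (nj : Int) : List (List String) :=
  let groups := (PySem.Dict.ofList data_dict).items.foldl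
    (fun g p => g.modify p.2 [] (fun l => l ++ [p.1])) PySem.Dict.empty
  let buckets := (PySem.List.pyRange 0 nj 1).map (fun _ => ([] : List String))
  let pq := (PySem.List.pyRange 0 nj 1).map (fun j => ((0 : Int), j))
  (groups.values.foldl pvStepB (buckets, pq)).1

-- ===== PRECONDITION & SPEC =====
-- Pre_ excludes exactly the inputs where Python A raises: a nonempty data_dict with
-- nj ≤ 0 makes A's min([]) raise ValueError (and B's pq.pop(0) raise IndexError).
def Pre_split_by_utt2spk (data_dict : List (String × String)) (nj : Int) : Prop :=
  data_dict = [] ∨ 0 < nj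
instance (data_dict : List (String × String)) (nj : Int) : Decidable (Pre_split_by_utt2spk data_dict nj) := by unfold Pre_split_by_utt2spk; infer_instance
def pvWitness_split_by_utt2spk : (List (String × String)) × Int := ([("u1", "s1"), ("u2", "s2"), ("u3", "s1")], 2)

def Spec_split_by_utt2spk (data_dict : List (String × String)) (nj : Int) (out : List (List String)) : Prop := out = split_by_utt2spk_alt data_dict nj
instance (data_dict : List (String × String)) (nj : Int) (out : List (List String)) : Decidable (Spec_split_by_utt2spk data_dict nj out) := by unfold Spec_split_by_utt2spk; infer_instance

-- ===== CLAIM (what is proved, stated in full; the proofs are below) =====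
def Claim_equal_split_by_utt2spk : Prop := ∀ (data_dict : List (String × String)) (nj : Int), Dom_split_by_utt2spk data_dict nj → Pre_split_by_utt2spk data_dict nj → Spec_split_by_utt2spk data_dict nj (split_by_utt2spk data_dict nj)

-- ===== LEMMAS AND PROOFS =====

-- non-strict lexicographic order on int pairs (proof-side)
def pvLexLe (a b : Int × Int) : Prop := a.1 < b.1 ∨ (a.1 = b.1 ∧ a.2 ≤ b.2)

lemma pvLexLt_iff (a b : Int × Int) : pvLexLt a b = true ↔ (a.1 < b.1 ∨ (a.1 = b.1 ∧ a.2 < b.2)) := by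
  simp [pvLexLt]

lemma pvLexLe_of_lt {a b : Int × Int} (h : pvLexLt a b = true) : pvLexLe a b := by
  rw [pvLexLt_iff] at h; unfold pvLexLe; omega

lemma pvLexLe_of_not_lt {a b : Int × Int} (h : ¬ pvLexLt a b = true) : pvLexLe b a := by
  rw [pvLexLt_iff] at h; unfold pvLexLe; omega

lemma pvLexLe_refl (a : Int × Int) : pvLexLe a a := by unfold pvLexLe; omega

lemma pvLexLe_trans {a b c : Int × Int} (h1 : pvLexLe a b) (h2 : pvLexLe b c) : pvLexLe a c := by
  unfold pvLexLe at *; omega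

-- the (length, index) pairs of the current bucket list
def pvPairs (rv : List (List String)) : List (Int × Int) :=
  (List.range rv.length).map (fun i => (((rv.getD i []).length : Int), (i : Int)))

-- loop invariant of B relative to A's bucket list
def pvInv (rv : List (List String)) (pq : List (Int × Int)) : Prop :=
  pq.Perm (pvPairs rv) ∧ List.Pairwise pvLexLe pq

lemma pvPairs_length (rv : List (List String)) : (pvPairs rv).length = rv.length := by
  simp [pvPairs]

lemma pvPairs_getElem (rv : List (List String)) (i : Nat) (h : i < rv.length) :
    (pvPairs rv)[i]'(by simpa [pvPairs_length]) = ((rv[i].length : Int), (i : Int)) := by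
  simp [pvPairs, List.getElem?_eq_getElem h]

lemma pvPairs_set (rv : List (List String)) (i : Nat) (x : List String) (h : i < rv.length) :
    pvPairs (rv.set i x) = (pvPairs rv).set i ((x.length : Int), (i : Int)) := by
  apply List.ext_getElem
  · simp [pvPairs_length]
  · intro t h1 h2
    have ht : t < rv.length := by simpa [pvPairs_length] using h2
    rw [List.getElem_set]
    have h1' : t < (rv.set i x).length := by simpa using ht
    rw [pvPairs_getElem _ _ h1', pvPairs_getElem _ _ ht]
    by_cases hti : i = t
    · subst hti; simp
    · simp [List.getElem_set, hti]

lemma pvTrail_le (item : Int × Int) (l : List (Int × Int)) : pvTrail item l ≤ l.length := by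
  induction l with
  | nil => simp [pvTrail]
  | cons p r ih => by_cases h : pvLexLt item p <;> simp [pvTrail, h] <;> omega

lemma pvTrail_take (item : Int × Int) (l : List (Int × Int)) :
    ∀ p ∈ l.take (pvTrail item l), pvLexLt item p = true := by
  induction l with
  | nil => simp
  | cons q r ih =>
    by_cases h : pvLexLt item q = true
    · simp only [pvTrail, h, if_pos, List.take_succ_cons]
      intro p hp
      rcases List.mem_cons.1 hp with hp | hp
      · simpa [hp] using h
      · exact ih p hp
    · simp [pvTrail, h]

lemma pvTrail_stop (item : Int × Int) (l : List (Int × Int)) (h : pvTrail item l < l.length) :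
    ¬ pvLexLt item (l[pvTrail item l]) = true := by
  induction l with
  | nil => simp at h
  | cons q r ih =>
    by_cases hq : pvLexLt item q = true
    · simp only [pvTrail, hq, if_pos] at h ⊢
      exact ih (by simpa using h)
    · simpa [pvTrail, hq] using hq

-- min? over Int without key returns any member that is a lower bound
lemma pvMinIdEq {xs : List Int} {m : Int} (hm : m ∈ xs) (hmin : ∀ y ∈ xs, m ≤ y) :
    PySem.List.min? xs (fun x => x) = some m := by
  cases xs with
  | nil => simp at hm
  | cons x t =>
    rw [PySem.List.min?_id_cons]
    have h1 := PySem.List.foldl_min_le t x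
    have h2 := PySem.List.foldl_min_mem t x
    have hle : List.foldl min x t ≤ m := by
      rcases List.mem_cons.1 hm with h | h
      · rw [h]; exact h1.1
      · exact h1.2 m h
    have hge : m ≤ List.foldl min x t := by
      rcases h2 with h2 | h2
      · rw [h2]; exact hmin x (by simp)
      · exact hmin _ (List.mem_cons_of_mem _ h2)
    exact congrArg some (le_antisymm hle hge)

-- empty-queue case: the bucket list is empty and both steps are no-ops
lemma pvStep_nil (rv : List (List String)) (utts : List String)
    (h : List.Perm ([] : List (Int × Int)) (pvPairs rv)) :
    pvStepA rv utts = rv := by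
  have hp : pvPairs rv = [] := (List.perm_nil.mp h.symm)
  have hrv : rv = [] := by
    have := pvPairs_length rv
    rw [hp] at this
    exact List.length_eq_zero_iff.mp this.symm
  subst hrv
  rfl

-- main step lemma: one loop iteration preserves the invariant and keeps buckets equal
lemma pvStep_main (rv : List (List String)) (pq : List (Int × Int)) (utts : List String)
    (h : pvInv rv pq) :
    pvStepA rv utts = (pvStepB (rv, pq) utts).1 ∧
      pvInv (pvStepA rv utts) (pvStepB (rv, pq) utts).2 := by
  obtain ⟨hperm, hsort⟩ := h
  match hpq : pq with
  | [] =>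
    refine ⟨(pvStep_nil rv utts hperm).trans rfl, ?_⟩
    rw [pvStep_nil rv utts hperm]
    exact ⟨hperm, List.Pairwise.nil⟩
  | (load, j) :: rest =>
    -- the head of the queue is a (length, index) pair of rv
    have hmem : (load, j) ∈ pvPairs rv := (hperm.mem_iff).mp (List.mem_cons_self)
    obtain ⟨i, hir, hpair⟩ := List.mem_map.mp hmem
    have hi : i < rv.length := List.mem_range.mp hir
    have hload : load = ((rv[i].length : Int)) := by
      have := congrArg Prod.fst hpair
      simp [List.getD_eq_getElem?_getD, List.getElem?_eq_getElem hi] at this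
      omega
    have hj : j = (i : Int) := (congrArg Prod.snd hpair).symm
    -- the head is a lex lower bound of all pairs
    have hle : ∀ p ∈ pvPairs rv, pvLexLe (load, j) p := by
      intro p hp
      rcases List.mem_cons.mp ((hperm.mem_iff).mpr hp) with he | hr
      · rw [← he]; exact pvLexLe_refl _
      · exact (List.pairwise_cons.mp hsort).1 p hr
    have hlget : ∀ t (_ : t < rv.length), (rv.map PySem.List.len)[t]'(by simpa) = ((rv[t].length : Int)) := by
      intro t ht
      simp [PySem.List.len]
    -- A's min is load
    have hmin : PySem.List.min? (rv.map PySem.List.len) (fun x => x) = some load := by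
      apply pvMinIdEq
      · rw [List.mem_iff_getElem]
        exact ⟨i, by simpa, by rw [hlget i hi, ← hload]⟩
      · intro y hy
        obtain ⟨t, ht, hyt⟩ := List.mem_iff_getElem.mp hy
        have ht' : t < rv.length := by simpa using ht
        have hpt : (((rv[t].length : Int)), (t : Int)) ∈ pvPairs rv := by
          apply List.mem_map.mpr
          exact ⟨t, List.mem_range.mpr ht', by simp [List.getD_eq_getElem?_getD, List.getElem?_eq_getElem ht']⟩
        have := hle _ hpt
        unfold pvLexLe at this
        have hyv : y = ((rv[t].length : Int)) := by rw [← hyt, hlget t ht']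
        simp only at this
        omega
    -- A's argmin is i
    have hidx : PySem.List.index? (rv.map PySem.List.len) load = some i := by
      rw [PySem.List.index?_eq_some_iff]
      refine ⟨(rv.map PySem.List.len).take i, (rv.map PySem.List.len).drop (i + 1), ?_, ?_, ?_⟩
      · conv_lhs => rw [← List.take_append_drop i (rv.map PySem.List.len)]
        congr 1
        rw [List.drop_eq_getElem_cons (by simpa using hi), hlget i hi, hload]
      · simp [hi.le]
      · intro hmemtk
        obtain ⟨t, htm, hteq⟩ := List.mem_take_iff_getElem.mp hmemtk
        have hti : t < i := lt_of_lt_of_le htm (by simp)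
        have ht' : t < rv.length := by omega
        have hpt : (((rv[t].length : Int)), (t : Int)) ∈ pvPairs rv := by
          apply List.mem_map.mpr
          exact ⟨t, List.mem_range.mpr ht', by simp [List.getD_eq_getElem?_getD, List.getElem?_eq_getElem ht']⟩
        have hlex := hle _ hpt
        unfold pvLexLe at hlex
        have htv : ((rv[t].length : Int)) = load := by rw [← hlget t ht', hteq]
        rw [hj] at hlex
        simp only at hlex
        omega
    -- both sides update bucket i
    have hAstep : pvStepA rv utts = rv.set i (rv.getD i [] ++ utts) := by
      simp only [pvStepA, hmin, hidx]
    have hjt : j.toNat = i := by rw [hj]; exact Int.toNat_natCast i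
    set item : Int × Int := (load + PySem.List.len utts, j) with hitem
    set t0 : Nat := pvTrail item rest.reverse with ht0
    have htle : t0 ≤ rest.length := by
      have := pvTrail_le item rest.reverse
      simpa using this
    set k : Nat := rest.length - t0 with hk
    have hBstep : pvStepB (rv, (load, j) :: rest) utts =
        (rv.set i (rv.getD i [] ++ utts), PySem.List.insert rest (k : Int) item) := by
      simp only [pvStepB, hjt, hk, ht0, hitem]
    have hins : PySem.List.insert rest (k : Int) item = rest.take k ++ item :: rest.drop k :=
      PySem.List.insert_natCast rest k item (by omega)
    -- buckets agree
    refine ⟨by rw [hAstep, hBstep], ?_⟩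
    rw [hAstep, hBstep]
    -- the new pair list
    have hgd : rv.getD i [] = rv[i] := by
      simp [List.getD_eq_getElem?_getD, List.getElem?_eq_getElem hi]
    have hitem_val : item = (((rv[i] ++ utts).length : Int), (i : Int)) := by
      rw [hitem, hload, hj]
      simp [PySem.List.len]
    have hpairs' : pvPairs (rv.set i (rv.getD i [] ++ utts)) =
        (pvPairs rv).set i item := by
      rw [pvPairs_set rv i _ hi, hgd, hitem_val]
    have hpi : i < (pvPairs rv).length := by simpa [pvPairs_length] using hi
    have hpairs_i : (pvPairs rv)[i]'hpi = (load, j) := by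
      rw [pvPairs_getElem rv i hi, ← hload, ← hj]
    have hset : (pvPairs rv).set i item =
        (pvPairs rv).take i ++ item :: (pvPairs rv).drop (i + 1) :=
      List.set_eq_take_cons_drop item hpi
    have hsplit : pvPairs rv =
        (pvPairs rv).take i ++ (load, j) :: (pvPairs rv).drop (i + 1) := by
      conv_lhs => rw [← List.take_append_drop i (pvPairs rv)]
      congr 1
      rw [List.drop_eq_getElem_cons hpi, hpairs_i]
    -- permutation
    have hmid1 : List.Perm (pvPairs rv)
        ((load, j) :: ((pvPairs rv).take i ++ (pvPairs rv).drop (i + 1))) := by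
      conv_lhs => rw [hsplit]
      exact List.perm_middle
    have hrest_perm : List.Perm rest ((pvPairs rv).take i ++ (pvPairs rv).drop (i + 1)) :=
      (hperm.trans hmid1).cons_inv
    have hperm' : List.Perm (rest.take k ++ item :: rest.drop k)
        ((pvPairs rv).set i item) := by
      have e1 : List.Perm (rest.take k ++ item :: rest.drop k) (item :: rest) := by
        have hm := List.perm_middle (a := item) (l₁ := rest.take k) (l₂ := rest.drop k)
        rw [List.take_append_drop] at hm
        exact hm
      have e2 : List.Perm (item :: rest)
          (item :: ((pvPairs rv).take i ++ (pvPairs rv).drop (i + 1))) :=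
        hrest_perm.cons item
      have e3 : List.Perm ((pvPairs rv).set i item)
          (item :: ((pvPairs rv).take i ++ (pvPairs rv).drop (i + 1))) := by
        rw [hset]
        exact List.perm_middle
      exact (e1.trans e2).trans e3.symm
    -- sortedness
    have hrest_pw : List.Pairwise pvLexLe rest := (List.pairwise_cons.mp hsort).2
    have hdrop_lt : ∀ p ∈ rest.drop k, pvLexLt item p = true := by
      intro p hp
      have hrev : rest.drop k = (rest.reverse.take t0).reverse := by
        rw [List.take_reverse, List.reverse_reverse, hk]
      apply pvTrail_take item rest.reverse
      rw [← List.mem_reverse, ← hrev]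
      exact hp
    have hstop : ∀ (_hkpos : 0 < k), ¬ pvLexLt item (rest[k - 1]'(by omega)) = true := by
      intro hkpos
      have htlt : t0 < rest.reverse.length := by rw [List.length_reverse]; omega
      have := pvTrail_stop item rest.reverse htlt
      rw [List.getElem_reverse] at this
      rw [Bool.not_eq_true] at this ⊢
      convert this using 3
      omega
    have htake_le : ∀ a ∈ rest.take k, pvLexLe a item := by
      intro a ha
      obtain ⟨q, hq, hqa⟩ := List.mem_take_iff_getElem.mp ha
      have hqk : q < k := lt_of_lt_of_le hq (min_le_left _ _)
      have hkpos : 0 < k := by omega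
      have hbd : pvLexLe (rest[k - 1]'(by omega)) item := pvLexLe_of_not_lt (hstop hkpos)
      rcases Nat.lt_or_ge q (k - 1) with hq1 | hq1
      · have hpw := List.pairwise_iff_getElem.mp hrest_pw q (k - 1) (by omega) (by omega) hq1
        rw [hqa] at hpw
        exact pvLexLe_trans hpw hbd
      · have hqe : q = k - 1 := by omega
        rw [← hqa]
        subst hqe
        exact hbd
    have hdrop_le : ∀ b ∈ rest.drop k, pvLexLe item b := fun b hb => pvLexLe_of_lt (hdrop_lt b hb)
    have hpw' : List.Pairwise pvLexLe (rest.take k ++ item :: rest.drop k) := by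
      rw [List.pairwise_append]
      refine ⟨List.Pairwise.sublist (List.take_sublist k rest) hrest_pw, ?_, ?_⟩
      · rw [List.pairwise_cons]
        exact ⟨hdrop_le, List.Pairwise.sublist (List.drop_sublist k rest) hrest_pw⟩
      · intro a ha b hb
        rcases List.mem_cons.mp hb with hbe | hbd
        · rw [hbe]; exact htake_le a ha
        · exact pvLexLe_trans (htake_le a ha) (hdrop_le b hbd)
    exact ⟨by rw [hpairs', hins]; exact hperm', by rw [hins]; exact hpw'⟩

lemma pvFold_main (vals : List (List String)) (rv : List (List String)) (pq : List (Int × Int))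
    (h : pvInv rv pq) :
    vals.foldl pvStepA rv = (vals.foldl pvStepB (rv, pq)).1 := by
  induction vals generalizing rv pq with
  | nil => rfl
  | cons v vs ih =>
    obtain ⟨heq, hinv⟩ := pvStep_main rv pq v h
    have e : pvStepB (rv, pq) v = (pvStepA rv v, (pvStepB (rv, pq) v).2) := by
      rw [heq]
    rw [List.foldl_cons, List.foldl_cons, e]
    exact ih _ _ hinv

-- inserting twice at the same key is inserting once
lemma pvInsert_insert (d : PySem.Dict String (List String)) (k : String) (v w : List String) :
    (d.insert k v).insert k w = d.insert k w := by
  have hins : ∀ (e : PySem.Dict String (List String)) (u : List String),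
      (e.insert k u).items = if e.contains k = true
        then e.items.map (fun p => if p.1 == k then (k, u) else p)
        else e.items ++ [(k, u)] := by
    intro e u
    by_cases h : e.contains k = true <;> simp [PySem.Dict.insert, h]
  apply PySem.Dict.ext
  rw [hins (d.insert k v) w, if_pos (PySem.Dict.contains_insert_self d k v),
      hins d w, hins d v]
  by_cases hc : d.contains k = true
  · rw [if_pos hc, if_pos hc, List.map_map]
    apply List.map_congr_left
    intro p _
    by_cases hp : p.1 == k <;> simp [Function.comp, hp]
  · rw [if_neg hc, if_neg hc, List.map_append]
    have hid : d.items.map (fun p => if p.1 == k then (k, w) else p) = d.items := by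
      conv_rhs => rw [← List.map_id d.items]
      apply List.map_congr_left
      intro p hp
      have hcf : d.items.any (fun q => q.1 == k) = false := by
        rw [Bool.not_eq_true] at hc
        simpa [PySem.Dict.contains] using hc
      have hne : (p.1 == k) = false := by
        simpa using List.any_eq_false.mp hcf p hp
      simp [hne]
    rw [hid]
    simp

-- the two grouping loops build the same dictionary
lemma pvGroup_eq (data_dict : List (String × String)) :
    pvGroupA data_dict =
      (PySem.Dict.ofList data_dict).items.foldl
        (fun g p => g.modify p.2 [] (fun l => l ++ [p.1])) PySem.Dict.empty := by
  unfold pvGroupA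
  apply PySem.List.foldl_congr_mem
  intro d p _
  dsimp only
  rw [PySem.Dict.modify]
  by_cases hc : d.contains p.2 = true
  · rw [if_pos hc]
  · rw [if_neg hc]
    have hg : (d.insert p.2 []).getD p.2 [] = [] := by
      simp [PySem.Dict.getD, PySem.Dict.get?_insert_self]
    have hg2 : d.getD p.2 [] = [] := by
      rw [Bool.not_eq_true] at hc
      simp [PySem.Dict.getD, (PySem.Dict.get?_eq_none_iff_contains d p.2).2 hc]
    rw [hg, hg2]
    exact pvInsert_insert d p.2 [] [p.1]

-- pyRange 0 nj 1 enumerated over Nat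
lemma pvRange_eq (nj : Int) :
    PySem.List.pyRange 0 nj 1 = List.map (fun k : Nat => (k : Int)) (List.range nj.toNat) := by
  by_cases h : 0 < nj
  · have he : nj = (nj.toNat : Int) := (Int.toNat_of_nonneg (le_of_lt h)).symm
    conv_lhs => rw [he]
    rw [PySem.List.pyRange_zero_natCast]
  · have h0 : nj.toNat = 0 := Int.toNat_of_nonpos (le_of_not_gt h)
    rw [h0]
    simp [PySem.List.pyRange, h]

-- the initial priority queue is the pair list of the initial buckets, sorted
lemma pvInv_init (nj : Int) :
    pvInv ((PySem.List.pyRange 0 nj 1).map (fun _ => ([] : List String)))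
          ((PySem.List.pyRange 0 nj 1).map (fun j => ((0 : Int), j))) := by
  rw [pvRange_eq]
  constructor
  · have hpairs : pvPairs ((List.map (fun k : Nat => (k : Int)) (List.range nj.toNat)).map
        (fun _ => ([] : List String)))
        = (List.map (fun k : Nat => (k : Int)) (List.range nj.toNat)).map (fun j => ((0 : Int), j)) := by
      apply List.ext_getElem
      · simp [pvPairs_length]
      · intro t h1 h2
        have ht : t < nj.toNat := by simpa using h2
        have htl : t < ((List.map (fun k : Nat => (k : Int)) (List.range nj.toNat)).map
            (fun _ => ([] : List String))).length := by simpa using ht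
        rw [pvPairs_getElem _ _ htl]
        simp only [List.getElem_map, List.getElem_range, List.length_nil, Nat.cast_zero]
    rw [hpairs]
  · rw [List.pairwise_iff_getElem]
    intro i j hi hj hij
    have hi' : i < nj.toNat := by simpa using hi
    have hj' : j < nj.toNat := by simpa using hj
    simp only [List.getElem_map, List.getElem_range]
    simp [pvLexLe]
    omega

-- ===== VERDICT (by name: the statement is the Claim_ definition above) =====
theorem split_by_utt2spk_spec : Claim_equal_split_by_utt2spk := by
  intro data_dict nj _ _
  unfold Spec_split_by_utt2spk split_by_utt2spk split_by_utt2spk_alt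
  rw [← pvGroup_eq]
  exact pvFold_main _ _ _ (pvInv_init nj)
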